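-- pv_equiv track=rewrite | github.com/teymurrzayev/python-naa | exam/check_segment_length.py | check_segment_length
-- ===== SOURCE A (Python) =====
-- def check_segment_length(s: str) -> bool:
--     max_ones = 0
--     max_zeros = 0
--     current_ones = 0
--     current_zeros = 0
--
--     for char in s:
--         if char == '1':
--             current_ones += 1
--             current_zeros = 0
--             if current_ones > max_ones:
--                 max_ones = current_ones
--         else:
--             current_zeros += 1
--             current_ones = 0
--             if current_zeros > max_zeros:
--                 max_zeros = current_zeros
--
--     return max_ones > max_zeros
-- ===== SOURCE B (Python) =====
-- def check_segment_length(s: str) -> bool: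
--     # Phase 1: run-length encode the string into maximal runs keyed by (c == '1').
--     runs = []  # list of (is_one_run, length)
--     for c in s:
--         k = (c == '1')
--         if runs and runs[-1][0] == k:
--             runs[-1] = (k, runs[-1][1] + 1)
--         else:
--             runs.append((k, 1))
--     # Phase 2: compare the longest 1-run with the longest other-run.
--     max_ones = max((n for k, n in runs if k), default=0)
--     max_zeros = max((n for k, n in runs if not k), default=0)
--     return max_ones > max_zeros
-- ===== Notes on version B (the rewrite author's own statement) =====
-- stated objective: alternative
-- what changed: B first run-length encodes the string into maximal runs keyed by whether each character is a one, then takes the maximum run length of each kind, instead of A's single pass with four interleaved counters.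
import Mathlib
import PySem

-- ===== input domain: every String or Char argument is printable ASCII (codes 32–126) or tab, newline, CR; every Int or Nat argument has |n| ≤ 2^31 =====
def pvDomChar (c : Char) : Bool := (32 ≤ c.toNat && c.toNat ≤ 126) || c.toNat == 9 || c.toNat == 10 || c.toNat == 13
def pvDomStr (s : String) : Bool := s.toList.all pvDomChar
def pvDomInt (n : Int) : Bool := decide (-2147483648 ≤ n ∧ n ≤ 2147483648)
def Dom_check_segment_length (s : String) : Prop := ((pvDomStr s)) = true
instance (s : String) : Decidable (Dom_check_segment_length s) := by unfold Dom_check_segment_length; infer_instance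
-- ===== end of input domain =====

-- B run-length encodes the string into maximal runs keyed by c=='1' and compares the
-- longest run length of each kind; A keeps four interleaved counters in one pass.


-- ===== PORT A =====
def csl_go : List Char → Nat → Nat → Nat → Nat → Bool
  | [], mo, mz, _, _ => decide (mo > mz)
  | c :: t, mo, mz, co, cz =>
    if c == '1' then
      csl_go t (if co + 1 > mo then co + 1 else mo) mz (co + 1) 0
    else
      csl_go t mo (if cz + 1 > mz then cz + 1 else mz) 0 (cz + 1)

def check_segment_length (s : String) : Bool :=
  csl_go s.toList 0 0 0 0

-- ===== PORT B =====
-- append char of key k to the run list: extend the last run if it has key k, else start a new run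
def csl_addRun (k : Bool) : List (Bool × Nat) → List (Bool × Nat)
  | [] => [(k, 1)]
  | [(k', n)] => if k' == k then [(k', n + 1)] else [(k', n), (k, 1)]
  | g :: g2 :: gs => g :: csl_addRun k (g2 :: gs)

-- max((n for k', n in runs if k' == k), default=0)
def csl_maxK (k : Bool) : List (Bool × Nat) → Nat
  | [] => 0
  | (k', n) :: gs => if k' == k then max n (csl_maxK k gs) else csl_maxK k gs

def check_segment_length_alt (s : String) : Bool :=
  let runs := s.toList.foldl (fun g c => csl_addRun (c == '1') g) []
  decide (csl_maxK true runs > csl_maxK false runs)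

-- ===== PRECONDITION & SPEC =====
def Spec_check_segment_length (s : String) (out : Bool) : Prop := out = check_segment_length_alt s
instance (s : String) (out : Bool) : Decidable (Spec_check_segment_length s out) := by unfold Spec_check_segment_length; infer_instance

-- ===== CLAIM (what is proved, stated in full; the proofs are below) =====
def Claim_equal_check_segment_length : Prop := ∀ (s : String), Dom_check_segment_length s → Spec_check_segment_length s (check_segment_length s)

-- ===== LEMMAS AND PROOFS =====

-- length of the trailing run if its key is k, else 0 (proof-only helper)
def csl_cur (k : Bool) : List (Bool × Nat) → Nat
  | [] => 0
  | [(k', n)] => if k' == k then n else 0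
  | _ :: g2 :: gs => csl_cur k (g2 :: gs)

theorem csl_addRun_ne_nil (k : Bool) (g : List (Bool × Nat)) : csl_addRun k g ≠ [] := by
  cases g with
  | nil => simp [csl_addRun]
  | cons hd t =>
    obtain ⟨k', n⟩ := hd
    cases t with
    | nil => by_cases h : k' = k <;> simp [csl_addRun, h]
    | cons g2 gs => simp [csl_addRun]

theorem csl_cur_cons (k : Bool) (a : Bool × Nat) (l : List (Bool × Nat)) (h : l ≠ []) :
    csl_cur k (a :: l) = csl_cur k l := by
  cases l with
  | nil => exact absurd rfl h
  | cons b t => rfl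

theorem csl_maxK_addRun_same (k : Bool) (g : List (Bool × Nat)) :
    csl_maxK k (csl_addRun k g) = max (csl_maxK k g) (csl_cur k g + 1) := by
  induction g with
  | nil => cases k <;> simp [csl_addRun, csl_maxK, csl_cur]
  | cons hd t ih =>
    obtain ⟨k', n⟩ := hd
    cases t with
    | nil => cases k' <;> cases k <;> simp [csl_addRun, csl_maxK, csl_cur]
    | cons g2 gs =>
      simp only [csl_addRun, csl_maxK, csl_cur, ih]
      split <;> omega

theorem csl_maxK_addRun_other (k k' : Bool) (h : k ≠ k') (g : List (Bool × Nat)) :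
    csl_maxK k (csl_addRun k' g) = csl_maxK k g := by
  induction g with
  | nil => cases k <;> cases k' <;> simp_all [csl_addRun, csl_maxK]
  | cons hd t ih =>
    obtain ⟨k'', n⟩ := hd
    cases t with
    | nil => cases k <;> cases k' <;> cases k'' <;> simp_all [csl_addRun, csl_maxK]
    | cons g2 gs => simp only [csl_addRun, csl_maxK, ih]

theorem csl_cur_addRun_same (k : Bool) (g : List (Bool × Nat)) :
    csl_cur k (csl_addRun k g) = csl_cur k g + 1 := by
  induction g with
  | nil => cases k <;> simp [csl_addRun, csl_cur]
  | cons hd t ih =>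
    obtain ⟨k', n⟩ := hd
    cases t with
    | nil => cases k' <;> cases k <;> simp [csl_addRun, csl_cur]
    | cons g2 gs =>
      rw [csl_addRun, csl_cur_cons k _ _ (csl_addRun_ne_nil k (g2 :: gs)), ih, csl_cur]

theorem csl_cur_addRun_other (k k' : Bool) (h : k ≠ k') (g : List (Bool × Nat)) :
    csl_cur k (csl_addRun k' g) = 0 := by
  induction g with
  | nil => cases k <;> cases k' <;> simp_all [csl_addRun, csl_cur]
  | cons hd t ih =>
    obtain ⟨k'', n⟩ := hd
    cases t with
    | nil => cases k <;> cases k' <;> cases k'' <;> simp_all [csl_addRun, csl_cur]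
    | cons g2 gs =>
      rw [csl_addRun, csl_cur_cons k _ _ (csl_addRun_ne_nil k' (g2 :: gs)), ih]

theorem csl_main (l : List Char) : ∀ (g : List (Bool × Nat)),
    csl_go l (csl_maxK true g) (csl_maxK false g) (csl_cur true g) (csl_cur false g)
      = decide (csl_maxK true (l.foldl (fun g c => csl_addRun (c == '1') g) g)
              > csl_maxK false (l.foldl (fun g c => csl_addRun (c == '1') g) g)) := by
  induction l with
  | nil => intro g; rfl
  | cons c t ih =>
    intro g
    simp only [csl_go, List.foldl]
    by_cases hc : (c == '1') = true
    · simp only [hc, if_true]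
      have e1 : (if csl_cur true g + 1 > csl_maxK true g then csl_cur true g + 1 else csl_maxK true g)
          = csl_maxK true (csl_addRun true g) := by
        rw [csl_maxK_addRun_same]; split <;> omega
      rw [e1, ← csl_maxK_addRun_other false true (by simp) g,
          ← csl_cur_addRun_same true g, ← csl_cur_addRun_other false true (by simp) g]
      exact ih (csl_addRun true g)
    · have hc' : (c == '1') = false := by simpa using hc
      simp only [hc', Bool.false_eq_true, if_false]
      have e1 : (if csl_cur false g + 1 > csl_maxK false g then csl_cur false g + 1 else csl_maxK false g)
          = csl_maxK false (csl_addRun false g) := by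
        rw [csl_maxK_addRun_same]; split <;> omega
      rw [e1, ← csl_maxK_addRun_other true false (by simp) g,
          ← csl_cur_addRun_same false g, ← csl_cur_addRun_other true false (by simp) g]
      exact ih (csl_addRun false g)

-- ===== VERDICT (by name: the statement is the Claim_ definition above) =====
theorem check_segment_length_spec : Claim_equal_check_segment_length := by
  intro s _
  show check_segment_length s = check_segment_length_alt s
  have h := csl_main s.toList []
  simpa [check_segment_length, check_segment_length_alt, csl_maxK, csl_cur] using h
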